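-- pv_equiv track=rewrite | github.com/expo98/Engenharia-Informatica | 1º Ano/1º Semestre/IPRP/Estudo/6.16 .py | posicoes
-- ===== SOURCE A (Python) =====
-- def posicoes(frase):
--     vogais={
--         "A":[],
--         "E":[],
--         "I":[],
--         "O":[],
--         "U":[],
--         "a":[],
--         "e":[],
--         "i":[],
--         "o":[],
--         "u":[]
--     }
--     for i in range(len(frase)):
--         for c,v in vogais.items():
--             if frase[i] == c:
--                 v= v.append(i)
--     return vogais
-- ===== SOURCE B (Python) =====
-- def posicoes(frase):
--     return {v: [i for i, c in enumerate(frase) if c == v] for v in "AEIOUaeiou"}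
-- ===== Notes on version B (the rewrite author's own statement) =====
-- stated objective: idiomatic
-- what changed: Replaced the nested loop (string pass with an inner scan over a mutable dict of lists) by a single dict comprehension keyed over the fixed vowel string, each vowel collecting its indices from enumerate(frase).
import Mathlib
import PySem

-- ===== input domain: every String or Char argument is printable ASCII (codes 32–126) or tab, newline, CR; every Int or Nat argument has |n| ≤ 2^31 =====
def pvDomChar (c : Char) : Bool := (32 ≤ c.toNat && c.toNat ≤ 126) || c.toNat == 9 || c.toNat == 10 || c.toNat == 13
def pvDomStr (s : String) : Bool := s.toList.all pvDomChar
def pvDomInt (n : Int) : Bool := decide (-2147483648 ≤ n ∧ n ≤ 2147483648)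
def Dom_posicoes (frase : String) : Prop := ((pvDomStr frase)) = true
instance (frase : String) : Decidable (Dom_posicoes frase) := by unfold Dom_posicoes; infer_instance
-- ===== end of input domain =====

-- B replaces A's string pass with an inner mutable-dict scan by a dict comprehension
-- over the fixed vowel string, each vowel collecting its indices from enumerate (idiomatic).

-- ===== PORT A =====
-- the initial dict {"A": [], …, "u": []}
def pvVogaisInit : List (String × List Int) :=
  [("A", []), ("E", []), ("I", []), ("O", []), ("U", []),
   ("a", []), ("e", []), ("i", []), ("o", []), ("u", [])]

def posicoes (frase : String) : List (String × List Int) :=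
  (PySem.List.pyRange 0 (PySem.Str.len frase) 1).foldl
    (fun vogais i =>
      vogais.map (fun cv =>
        if (PySem.Str.pyGet? frase i).map (fun ch => String.ofList [ch]) = some cv.1
        then (cv.1, cv.2 ++ [i]) else cv))
    pvVogaisInit

-- ===== PORT B =====
def posicoes_alt (frase : String) : List (String × List Int) :=
  "AEIOUaeiou".toList.map (fun v =>
    (String.ofList [v],
     (PySem.List.enumerate frase.toList 0).filterMap
       (fun ic => if ic.2 = v then some ic.1 else none)))

-- ===== PRECONDITION & SPEC =====
def Spec_posicoes (frase : String) (out : List (String × List Int)) : Prop := out = posicoes_alt frase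
instance (frase : String) (out : List (String × List Int)) : Decidable (Spec_posicoes frase out) := by unfold Spec_posicoes; infer_instance

-- ===== CLAIM (what is proved, stated in full; the proofs are below) =====
def Claim_equal_posicoes : Prop := ∀ (frase : String), Dom_posicoes frase → Spec_posicoes frase (posicoes frase)

-- ===== LEMMAS AND PROOFS =====

-- folding a per-step map = mapping a per-element fold
theorem foldl_map_comm {α β : Type} (g : β → α → α) :
    ∀ (L : List β) (d : List α),
      L.foldl (fun d i => d.map (g i)) d = d.map (fun cv => L.foldl (fun c i => g i c) cv) := by
  intro L
  induction L with
  | nil => intro d; simp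
  | cons x xs ih => intro d; simp [List.foldl_cons, ih, Function.comp]

-- A's per-key fold appends exactly the indices whose character equals the key
theorem foldA (frase : String) :
    ∀ (L : List Int) (cv : String × List Int),
      L.foldl (fun c i =>
          if (PySem.Str.pyGet? frase i).map (fun ch => String.ofList [ch]) = some c.1
          then (c.1, c.2 ++ [i]) else c) cv
        = (cv.1, cv.2 ++ L.filter (fun i =>
            decide ((PySem.Str.pyGet? frase i).map (fun ch => String.ofList [ch]) = some cv.1))) := by
  intro L
  induction L with
  | nil => intro cv; simp
  | cons x xs ih =>
    intro cv
    rw [List.foldl_cons, List.filter_cons]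
    by_cases h : (PySem.Str.pyGet? frase x).map (fun ch => String.ofList [ch]) = some cv.1
    · rw [if_pos h, ih, decide_eq_true h]
      simp
    · rw [if_neg h, ih, decide_eq_false h]
      simp

theorem filterMap_guard_eq_filter {α : Type} (p : α → Bool) (L : List α) :
    L.filterMap (fun x => if p x then some x else none) = L.filter p := by
  induction L with
  | nil => rfl
  | cons x xs ih => by_cases h : p x <;> simp [h, ih]

-- the two index lists coincide for every key character
theorem key_lists (frase : String) (v : Char) :
    (PySem.List.pyRange 0 (PySem.Str.len frase) 1).filter (fun i =>
        decide ((PySem.Str.pyGet? frase i).map (fun ch => String.ofList [ch]) = some (String.ofList [v])))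
      = (PySem.List.enumerate frase.toList 0).filterMap
          (fun ic => if ic.2 = v then some ic.1 else none) := by
  rw [PySem.List.enumerate_eq_map_pyRange frase.toList v, List.filterMap_map]
  have hlen : PySem.List.len frase.toList = PySem.Str.len frase := by
    simp [PySem.List.len, PySem.Str.len_eq]
  rw [hlen, ← filterMap_guard_eq_filter]
  apply List.filterMap_congr
  intro i hi
  rw [PySem.List.mem_pyRange_one] at hi
  have h0 : (0:Int) ≤ i := hi.1
  have h1 : i < (frase.toList.length : Int) := by
    have := hi.2; rwa [PySem.Str.len_eq] at this
  have hget : PySem.Str.pyGet? frase i = some frase.toList[i.toNat] := by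
    rw [PySem.Str.pyGet?_eq, PySem.Chars.pyGet?_eq_listPyGet?]
    exact PySem.List.pyGet?_eq_some_getElem _ h0 h1
  have hgetD : PySem.List.pyGetD frase.toList i v = frase.toList[i.toNat] :=
    PySem.List.pyGetD_eq_getElem _ v h0 h1
  simp only [Function.comp, hget, hgetD, Option.map_some]
  by_cases h : frase.toList[i.toNat] = v
  · simp [h]
  · have hne : ¬ (String.ofList [frase.toList[i.toNat]] = String.ofList [v]) := by
      simpa [String.ofList_inj] using h
    simp [h, hne]

theorem posicoes_spec_aux (frase : String) :
    posicoes frase = posicoes_alt frase := by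
  unfold posicoes posicoes_alt
  rw [foldl_map_comm]
  have hinit : pvVogaisInit
      = "AEIOUaeiou".toList.map (fun v => ((String.ofList [v] : String), ([] : List Int))) := by
    decide
  rw [hinit, List.map_map]
  apply List.map_congr_left
  intro v _
  simp only [Function.comp, foldA, List.nil_append, key_lists]

-- ===== VERDICT (by name: the statement is the Claim_ definition above) =====
theorem posicoes_spec : Claim_equal_posicoes := by
  intro frase _
  unfold Spec_posicoes
  exact posicoes_spec_aux frase
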